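-- pv_equiv track=rewrite | github.com/jcraig949jfi/Prometheus | cartography/v2/genus2_phase_coherence.py | _pow_Fp2
-- ===== SOURCE A (Python) =====
-- def _pow_Fp2(a, b, exp, p, nr):
--     """Compute (a + b*sqrt(nr))^exp in F_{p^2} via repeated squaring."""
--     res_a, res_b = 1, 0
--     base_a, base_b = a % p, b % p
--     while exp > 0:
--         if exp & 1:
--             # res *= base
--             new_a = (res_a * base_a + res_b * base_b * nr) % p
--             new_b = (res_a * base_b + res_b * base_a) % p
--             res_a, res_b = new_a, new_b
--         # base *= base
--         new_a = (base_a * base_a + base_b * base_b * nr) % p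
--         new_b = (2 * base_a * base_b) % p
--         base_a, base_b = new_a, new_b
--         exp >>= 1
--     return res_a, res_b
-- ===== SOURCE B (Python) =====
-- def _pow_Fp2(a, b, exp, p, nr):
--     """Compute (a + b*sqrt(nr))^exp in F_{p^2}, left-to-right:
--     extract the bit list of exp, then scan it MSB-first, squaring the
--     accumulator each step and multiplying in the fixed reduced base."""
--     base_a, base_b = a % p, b % p
--     bits = []
--     n = exp
--     while n > 0:
--         bits.append(n & 1)
--         n >>= 1
--     res_a, res_b = 1, 0
--     for bit in reversed(bits):
--         # res *= res
--         res_a, res_b = (res_a * res_a + res_b * res_b * nr) % p, (2 * res_a * res_b) % p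
--         if bit:
--             # res *= base
--             res_a, res_b = (res_a * base_a + res_b * base_b * nr) % p, (res_a * base_b + res_b * base_a) % p
--     return res_a, res_b
-- ===== Notes on version B (the rewrite author's own statement) =====
-- stated objective: alternative
-- what changed: Right-to-left binary exponentiation (test the low bit, square the base, shift the exponent) is replaced by left-to-right exponentiation: the bit list of exp is extracted once, then scanned MSB-first, squaring the accumulator and multiplying in the fixed base.
import Mathlib
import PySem

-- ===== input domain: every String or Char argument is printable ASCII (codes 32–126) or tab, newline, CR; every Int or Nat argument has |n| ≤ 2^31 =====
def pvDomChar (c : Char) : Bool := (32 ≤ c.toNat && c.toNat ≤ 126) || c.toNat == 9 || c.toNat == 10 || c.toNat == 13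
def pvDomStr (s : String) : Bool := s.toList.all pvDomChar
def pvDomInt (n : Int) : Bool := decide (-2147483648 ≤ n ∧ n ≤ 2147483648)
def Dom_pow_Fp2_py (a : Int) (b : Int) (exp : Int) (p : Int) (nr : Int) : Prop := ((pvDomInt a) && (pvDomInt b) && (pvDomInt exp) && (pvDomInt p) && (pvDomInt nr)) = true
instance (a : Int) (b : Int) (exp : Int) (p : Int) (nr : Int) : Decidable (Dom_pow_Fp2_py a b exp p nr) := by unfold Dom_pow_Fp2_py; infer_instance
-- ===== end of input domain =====

-- B replaces A's right-to-left binary exponentiation by left-to-right (bit list extracted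
-- once, scanned MSB-first, squaring the accumulator): an alternative decomposition, same cost.


-- termination helper for both loops (exp >>= 1 / n >>= 1, i.e. floor division by 2)
theorem pvHalf_lt (e : Int) (h : 0 < e) : (PySem.Int.floordiv e 2).toNat < e.toNat := by
  rw [PySem.Int.floordiv_eq_ediv_of_pos (by norm_num : (0:Int) < 2)]; omega

-- ===== PORT A =====
-- the while-loop; 'exp & 1' is ported as 'exp mod 2' and 'exp >> 1' as 'exp // 2'
-- (exact for every Python int, including negatives)
def powA_loop (p nr : Int) (res base : Int × Int) (e : Int) : Int × Int :=
  if h : 0 < e then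
    let res' := if PySem.Int.mod e 2 = 1 then
        (PySem.Int.mod (res.1 * base.1 + res.2 * base.2 * nr) p,
         PySem.Int.mod (res.1 * base.2 + res.2 * base.1) p)
      else res
    let base' := (PySem.Int.mod (base.1 * base.1 + base.2 * base.2 * nr) p,
                  PySem.Int.mod (2 * base.1 * base.2) p)
    powA_loop p nr res' base' (PySem.Int.floordiv e 2)
  else res
termination_by e.toNat
decreasing_by exact pvHalf_lt e h

def pow_Fp2_py (a : Int) (b : Int) (exp : Int) (p : Int) (nr : Int) : Int × Int :=
  powA_loop p nr (1, 0) (PySem.Int.mod a p, PySem.Int.mod b p) exp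

-- ===== PORT B =====
-- the bit-collection while-loop of B ('n & 1' as 'n mod 2', 'n >> 1' as 'n // 2'; exact)
def powB_bits (e : Int) : List Int :=
  if h : 0 < e then PySem.Int.mod e 2 :: powB_bits (PySem.Int.floordiv e 2) else []
termination_by e.toNat
decreasing_by exact pvHalf_lt e h

-- the body of B's for-loop over the reversed bit list
def powB_step (p nr ba bb : Int) (r : Int × Int) (bit : Int) : Int × Int :=
  let sa := PySem.Int.mod (r.1 * r.1 + r.2 * r.2 * nr) p
  let sb := PySem.Int.mod (2 * r.1 * r.2) p
  if bit ≠ 0 then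
    (PySem.Int.mod (sa * ba + sb * bb * nr) p, PySem.Int.mod (sa * bb + sb * ba) p)
  else (sa, sb)

def pow_Fp2_py_alt (a : Int) (b : Int) (exp : Int) (p : Int) (nr : Int) : Int × Int :=
  ((powB_bits exp).reverse).foldl (powB_step p nr (PySem.Int.mod a p) (PySem.Int.mod b p)) (1, 0)

-- ===== PRECONDITION & SPEC =====
-- Pre_ excludes exactly p = 0, on which Python's '%' raises ZeroDivisionError (in A and in B alike).
def Pre_pow_Fp2_py (a : Int) (b : Int) (exp : Int) (p : Int) (nr : Int) : Prop := p ≠ 0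
instance (a : Int) (b : Int) (exp : Int) (p : Int) (nr : Int) : Decidable (Pre_pow_Fp2_py a b exp p nr) := by unfold Pre_pow_Fp2_py; infer_instance
def pvWitness_pow_Fp2_py : Int × Int × Int × Int × Int := (2, 3, 5, 7, 2)

def Spec_pow_Fp2_py (a : Int) (b : Int) (exp : Int) (p : Int) (nr : Int) (out : Int × Int) : Prop := out = pow_Fp2_py_alt a b exp p nr
instance (a : Int) (b : Int) (exp : Int) (p : Int) (nr : Int) (out : Int × Int) : Decidable (Spec_pow_Fp2_py a b exp p nr out) := by unfold Spec_pow_Fp2_py; infer_instance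

-- ===== CLAIM (what is proved, stated in full; the proofs are below) =====
def Claim_equal_pow_Fp2_py : Prop := ∀ (a : Int) (b : Int) (exp : Int) (p : Int) (nr : Int), Dom_pow_Fp2_py a b exp p nr → Pre_pow_Fp2_py a b exp p nr → Spec_pow_Fp2_py a b exp p nr (pow_Fp2_py a b exp p nr)

-- ===== LEMMAS AND PROOFS =====

-- multiplication in F_{p^2} (both components reduced), reduction, and the n-th power
def pvMul (p nr : Int) (x y : Int × Int) : Int × Int :=
  ((x.1 * y.1 + x.2 * y.2 * nr).fmod p, (x.1 * y.2 + x.2 * y.1).fmod p)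
def pvRed (p : Int) (x : Int × Int) : Int × Int := (x.1.fmod p, x.2.fmod p)
def pvP (p nr : Int) (x : Int × Int) : Nat → Int × Int
  | 0 => (1, 0)
  | n + 1 => pvMul p nr x (pvP p nr x n)

theorem fmod_idem (x p : Int) : (x.fmod p).fmod p = x.fmod p :=
  Int.fmod_fmod_of_dvd _ dvd_rfl

theorem fmod_addc {p a a' b b' : Int} (ha : a.fmod p = a'.fmod p) (hb : b.fmod p = b'.fmod p) :
    (a + b).fmod p = (a' + b').fmod p := by
  rw [Int.add_fmod, ha, hb, ← Int.add_fmod]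

theorem fmod_mulc {p a a' b b' : Int} (ha : a.fmod p = a'.fmod p) (hb : b.fmod p = b'.fmod p) :
    (a * b).fmod p = (a' * b').fmod p := by
  rw [Int.mul_fmod, ha, hb, ← Int.mul_fmod]

theorem pvMul_red_left (p nr : Int) (x y : Int × Int) : pvMul p nr (pvRed p x) y = pvMul p nr x y := by
  unfold pvMul pvRed
  exact Prod.ext
    (fmod_addc (fmod_mulc (fmod_idem _ _) rfl) (fmod_mulc (fmod_mulc (fmod_idem _ _) rfl) rfl))
    (fmod_addc (fmod_mulc (fmod_idem _ _) rfl) (fmod_mulc (fmod_idem _ _) rfl))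

theorem pvMul_red_right (p nr : Int) (x y : Int × Int) : pvMul p nr x (pvRed p y) = pvMul p nr x y := by
  unfold pvMul pvRed
  exact Prod.ext
    (fmod_addc (fmod_mulc rfl (fmod_idem _ _)) (fmod_mulc (fmod_mulc rfl (fmod_idem _ _)) rfl))
    (fmod_addc (fmod_mulc rfl (fmod_idem _ _)) (fmod_mulc rfl (fmod_idem _ _)))

theorem pvMul_comm (p nr : Int) (x y : Int × Int) : pvMul p nr x y = pvMul p nr y x := by
  unfold pvMul
  exact Prod.ext (by rw [show x.1 * y.1 + x.2 * y.2 * nr = y.1 * x.1 + y.2 * x.2 * nr from by ring])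
    (by rw [show x.1 * y.2 + x.2 * y.1 = y.1 * x.2 + y.2 * x.1 from by ring])

theorem pvMul_assoc (p nr : Int) (x y z : Int × Int) :
    pvMul p nr (pvMul p nr x y) z = pvMul p nr x (pvMul p nr y z) := by
  have h1 : pvMul p nr x y = pvRed p (x.1 * y.1 + x.2 * y.2 * nr, x.1 * y.2 + x.2 * y.1) := rfl
  have h2 : pvMul p nr y z = pvRed p (y.1 * z.1 + y.2 * z.2 * nr, y.1 * z.2 + y.2 * z.1) := rfl
  rw [h1, h2, pvMul_red_left, pvMul_red_right]
  unfold pvMul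
  exact Prod.ext
    (by rw [show (x.1 * y.1 + x.2 * y.2 * nr) * z.1 + (x.1 * y.2 + x.2 * y.1) * z.2 * nr
        = x.1 * (y.1 * z.1 + y.2 * z.2 * nr) + x.2 * (y.1 * z.2 + y.2 * z.1) * nr from by ring])
    (by rw [show (x.1 * y.1 + x.2 * y.2 * nr) * z.2 + (x.1 * y.2 + x.2 * y.1) * z.1
        = x.1 * (y.1 * z.2 + y.2 * z.1) + x.2 * (y.1 * z.1 + y.2 * z.2 * nr) from by ring])

theorem pvMul_one_right (p nr : Int) (x : Int × Int) : pvMul p nr x (1, 0) = pvRed p x := by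
  unfold pvMul pvRed
  exact Prod.ext (by norm_num) (by norm_num)

theorem pvMul_one_left (p nr : Int) (x : Int × Int) : pvMul p nr (1, 0) x = pvRed p x := by
  rw [pvMul_comm]; exact pvMul_one_right p nr x

theorem pvRed_mul (p nr : Int) (x y : Int × Int) : pvRed p (pvMul p nr x y) = pvMul p nr x y := by
  unfold pvMul pvRed
  exact Prod.ext (fmod_idem _ _) (fmod_idem _ _)

theorem pvP_red (p nr : Int) (x : Int × Int) (n : Nat) (h : 1 ≤ n) :
    pvRed p (pvP p nr x n) = pvP p nr x n := by
  obtain ⟨k, rfl⟩ := Nat.exists_eq_add_of_le h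
  rw [show 1 + k = k + 1 from by omega]
  exact pvRed_mul p nr _ _

theorem pvP_add (p nr : Int) (x : Int × Int) (m n : Nat) (hn : 1 ≤ n) :
    pvP p nr x (m + n) = pvMul p nr (pvP p nr x m) (pvP p nr x n) := by
  induction m with
  | zero => rw [Nat.zero_add]; exact ((pvMul_one_left p nr _).trans (pvP_red p nr x n hn)).symm
  | succ k ih =>
    rw [show k + 1 + n = (k + n) + 1 from by omega]
    show pvMul p nr x (pvP p nr x (k + n)) = _
    rw [ih, ← pvMul_assoc]
    rfl

theorem pvP_two (p nr : Int) (x : Int × Int) : pvP p nr x 2 = pvMul p nr x x := by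
  show pvMul p nr x (pvMul p nr x (1, 0)) = _
  rw [pvMul_one_right, pvMul_red_right]

theorem pvP_mul (p nr : Int) (x : Int × Int) (j k : Nat) (hj : 1 ≤ j) (hk : 1 ≤ k) :
    pvP p nr (pvP p nr x j) k = pvP p nr x (j * k) := by
  induction k with
  | zero => omega
  | succ k ih =>
    rcases Nat.eq_or_lt_of_le hk with h1 | h1
    · rw [← h1]
      show pvMul p nr (pvP p nr x j) (pvP p nr (pvP p nr x j) 0) = _
      show pvMul p nr (pvP p nr x j) (1, 0) = _
      rw [pvMul_one_right, pvP_red p nr x j hj, Nat.mul_one]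
    · have hk1 : 1 ≤ k := by omega
      show pvMul p nr (pvP p nr x j) (pvP p nr (pvP p nr x j) k) = _
      rw [ih hk1, ← pvP_add p nr x j (j * k) (Nat.mul_pos hj hk1), Nat.mul_succ]
      ring_nf

-- the squared base / squared accumulator written as in the ports equals pvMul x x
theorem pvSq_eq (p nr : Int) (x : Int × Int) :
    (PySem.Int.mod (x.1 * x.1 + x.2 * x.2 * nr) p, PySem.Int.mod (2 * x.1 * x.2) p) = pvMul p nr x x := by
  unfold PySem.Int.mod pvMul
  exact Prod.ext rfl (by rw [show 2 * x.1 * x.2 = x.1 * x.2 + x.2 * x.1 from by ring])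

theorem pvP_sq (p nr : Int) (x : Int × Int) (k : Nat) (hk : 1 ≤ k) :
    pvP p nr (pvMul p nr x x) k = pvP p nr x (2 * k) := by
  rw [← pvP_two, pvP_mul p nr x 2 k (by omega) hk]

-- one iteration of B's for-loop, in terms of pvMul
theorem powB_step_char (p nr : Int) (bse r : Int × Int) (bit : Int) :
    powB_step p nr bse.1 bse.2 r bit =
      if bit ≠ 0 then pvMul p nr (pvMul p nr r r) bse else pvMul p nr r r := by
  unfold powB_step
  split_ifs with hb
  · show pvMul p nr (PySem.Int.mod (r.1 * r.1 + r.2 * r.2 * nr) p, PySem.Int.mod (2 * r.1 * r.2) p) bse = _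
    rw [pvSq_eq]
  · exact pvSq_eq p nr r

-- characterisation of A's while-loop
theorem powA_loop_eq (p nr : Int) : ∀ (n : Nat) (e : Int) (r bse : Int × Int), 0 < e → e.toNat ≤ n →
    powA_loop p nr r bse e = pvMul p nr r (pvP p nr bse e.toNat) := by
  intro n
  induction n with
  | zero => intro e r bse he hn; omega
  | succ n ih =>
    intro e r bse he hn
    rw [powA_loop, dif_pos he]
    have hmod : PySem.Int.mod e 2 = e % 2 := PySem.Int.mod_eq_emod_of_pos (by norm_num)
    have hdiv : PySem.Int.floordiv e 2 = e / 2 := PySem.Int.floordiv_eq_ediv_of_pos (by norm_num)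
    have hsq : (PySem.Int.mod (bse.1 * bse.1 + bse.2 * bse.2 * nr) p,
        PySem.Int.mod (2 * bse.1 * bse.2) p) = pvMul p nr bse bse := pvSq_eq p nr bse
    by_cases h1 : e = 1
    · subst h1
      simp only [hmod, hdiv]
      norm_num
      rw [powA_loop, dif_neg (by norm_num)]
      show pvMul p nr r bse = pvMul p nr r (pvP p nr bse 1)
      rw [show pvP p nr bse 1 = pvMul p nr bse (1, 0) from rfl, pvMul_one_right, pvMul_red_right]
    · have he2 : 2 ≤ e := by omega
      have hd : 0 < e / 2 := by omega
      have hdn : (e / 2).toNat ≤ n := by omega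
      have hk1 : 1 ≤ (e / 2).toNat := by omega
      by_cases hodd : PySem.Int.mod e 2 = 1
      · simp only [if_pos hodd, hdiv, hsq]
        rw [ih (e / 2) _ _ hd hdn, pvP_sq p nr bse _ hk1]
        have : (pvMul p nr r bse) = pvMul p nr r bse := rfl
        show pvMul p nr (pvMul p nr r bse) (pvP p nr bse (2 * (e / 2).toNat)) = _
        rw [pvMul_assoc]
        have hstep : pvMul p nr bse (pvP p nr bse (2 * (e / 2).toNat)) =
            pvP p nr bse (2 * (e / 2).toNat + 1) := rfl
        rw [hstep]
        have hE : e.toNat = 2 * (e / 2).toNat + 1 := by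
          rw [hmod] at hodd; omega
        rw [hE]
      · simp only [if_neg hodd, hdiv, hsq]
        rw [ih (e / 2) _ _ hd hdn, pvP_sq p nr bse _ hk1]
        have hE : e.toNat = 2 * (e / 2).toNat := by
          rw [hmod] at hodd
          have : e % 2 = 0 ∨ e % 2 = 1 := by omega
          rcases this with h | h
          · omega
          · exact absurd h hodd
        rw [hE]

-- characterisation of B's fold over the reversed bit list
theorem powB_fold_eq (p nr : Int) (bse : Int × Int) : ∀ (n : Nat) (e : Int), 0 < e → e.toNat ≤ n →
    ((powB_bits e).reverse).foldl (powB_step p nr bse.1 bse.2) (1, 0) = pvP p nr bse e.toNat := by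
  intro n
  induction n with
  | zero => intro e he hn; omega
  | succ n ih =>
    intro e he hn
    rw [powB_bits, dif_pos he]
    have hmod : PySem.Int.mod e 2 = e % 2 := PySem.Int.mod_eq_emod_of_pos (by norm_num)
    have hdiv : PySem.Int.floordiv e 2 = e / 2 := PySem.Int.floordiv_eq_ediv_of_pos (by norm_num)
    have hP1 : pvP p nr bse 1 = pvRed p bse := by
      show pvMul p nr bse (1, 0) = _; rw [pvMul_one_right]
    rw [List.reverse_cons, List.foldl_append]
    by_cases h1 : e = 1
    · subst h1
      rw [hdiv]
      norm_num
      rw [powB_bits, dif_neg (by norm_num)]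
      show powB_step p nr bse.1 bse.2 (1, 0) (PySem.Int.mod 1 2) = pvP p nr bse 1
      rw [hmod, powB_step_char, if_pos (by norm_num), pvMul_one_left, pvMul_red_left,
        pvMul_one_left, hP1]
    · have he2 : 2 ≤ e := by omega
      have hd : 0 < e / 2 := by omega
      have hdn : (e / 2).toNat ≤ n := by omega
      have hk1 : 1 ≤ (e / 2).toNat := by omega
      rw [hdiv, ih (e / 2) hd hdn]
      show powB_step p nr bse.1 bse.2 (pvP p nr bse (e / 2).toNat) (PySem.Int.mod e 2)
          = pvP p nr bse e.toNat
      rw [powB_step_char]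
      have hvv : pvMul p nr (pvP p nr bse (e / 2).toNat) (pvP p nr bse (e / 2).toNat)
          = pvP p nr bse ((e / 2).toNat + (e / 2).toNat) :=
        (pvP_add p nr bse (e / 2).toNat (e / 2).toNat hk1).symm
      by_cases hodd : e % 2 = 1
      · rw [if_pos (by rw [hmod, hodd]; norm_num), hvv]
        have hE : e.toNat = (e / 2).toNat + (e / 2).toNat + 1 := by omega
        rw [hE]
        show pvMul p nr (pvP p nr bse _) bse = pvMul p nr bse (pvP p nr bse _)
        rw [pvMul_comm]
      · rw [if_neg (by rw [hmod]; omega), hvv]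
        have hE : e.toNat = (e / 2).toNat + (e / 2).toNat := by omega
        rw [hE]

-- ===== VERDICT (by name: the statement is the Claim_ definition above) =====
theorem pow_Fp2_py_spec : Claim_equal_pow_Fp2_py := by
  intro a b exp p nr hdom hpre
  unfold Spec_pow_Fp2_py pow_Fp2_py pow_Fp2_py_alt
  by_cases he : 0 < exp
  · rw [powA_loop_eq p nr exp.toNat exp _ _ he le_rfl]
    have hn1 : 1 ≤ exp.toNat := by omega
    rw [pvMul_one_left, pvP_red p nr _ _ hn1]
    exact (powB_fold_eq p nr (PySem.Int.mod a p, PySem.Int.mod b p) exp.toNat exp he le_rfl).symm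
  · rw [powA_loop, dif_neg he, powB_bits, dif_neg he]
    rfl
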